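-- pv_equiv track=rewrite | github.com/Grigoreva2003/Avito_HSE_algorithms | homework_1/sum/main.py | max_even_sum
-- ===== SOURCE A (Python) =====
-- def max_even_sum(lst):
--     sum_ = 0
--     min_odd = None
--
--     for x in lst:
--         if x % 2 == 1:
--             if min_odd is None:
--                 min_odd = x
--             else:
--                 min_odd = min(min_odd, x)
--         sum_ += x
--
--     if sum_ % 2 == 1:
--         return sum_ - min_odd
--     return sum_
-- ===== SOURCE B (Python) =====
-- def max_even_sum(lst):
--     evens = []
--     odds = []
--     for x in lst:
--         if x % 2 == 1:
--             odds.append(x)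
--         else:
--             evens.append(x)
--     odds.sort()
--     if len(odds) % 2 == 1:
--         odds = odds[1:]
--     return sum(evens) + sum(odds)
-- ===== Notes on version B (the rewrite author's own statement) =====
-- stated objective: alternative
-- what changed: Replaces A's single fused pass (running sum plus running minimum-odd tracking, then a parity test on the sum) by partitioning into even and odd buckets, sorting the odd bucket and dropping its first element when the odd count is odd, then summing both buckets -- parity is read off the count of odds, and the minimum odd is the head of the sorted bucket rather than a tracked accumulator.
import Mathlib
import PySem

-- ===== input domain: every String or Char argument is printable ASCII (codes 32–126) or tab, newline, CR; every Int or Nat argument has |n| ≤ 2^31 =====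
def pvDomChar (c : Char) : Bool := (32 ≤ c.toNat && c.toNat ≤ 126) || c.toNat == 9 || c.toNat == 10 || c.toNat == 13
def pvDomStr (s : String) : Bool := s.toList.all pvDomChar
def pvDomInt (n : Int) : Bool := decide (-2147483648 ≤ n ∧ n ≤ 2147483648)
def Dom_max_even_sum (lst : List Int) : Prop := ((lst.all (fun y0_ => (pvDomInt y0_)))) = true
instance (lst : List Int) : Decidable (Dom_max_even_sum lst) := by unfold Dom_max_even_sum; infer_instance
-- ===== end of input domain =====

-- B partitions into even/odd buckets, sorts the odd bucket and drops its head when the odd count is odd,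
-- then sums the buckets — instead of A's fused running-sum + running-minimum-odd pass; same return value.


-- ===== PORT A =====
-- A: one fused pass accumulating the sum and the minimum odd element together.
-- (When sum_ is odd min_odd is never None in Python, so the `.getD 0` default is unreachable.)
def pvALoop : List Int → Int × Option Int → Int × Option Int
  | [], st => st
  | x :: xs, (s, mo) =>
    pvALoop xs
      (if PySem.Int.mod x 2 == 1 then
        (s + x, match mo with | none => some x | some m => some (min m x))
      else (s + x, mo))

def max_even_sum (lst : List Int) : Int :=
  let st := pvALoop lst (0, none)
  if PySem.Int.mod st.1 2 == 1 then st.1 - st.2.getD 0 else st.1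

-- ===== PORT B =====
-- B: partition into evens and odds, sort the odds, drop the smallest odd when the odd count is odd, sum both buckets.
def pvPartLoop : List Int → List Int × List Int → List Int × List Int
  | [], st => st
  | x :: xs, (ev, od) =>
    pvPartLoop xs (if PySem.Int.mod x 2 == 1 then (ev, od ++ [x]) else (ev ++ [x], od))

def max_even_sum_alt (lst : List Int) : Int :=
  let p := pvPartLoop lst ([], [])
  let odds := PySem.List.sorted p.2 (fun y => y) false
  let odds := if PySem.Int.mod (odds.length : Int) 2 == 1 then PySem.List.slice odds (some 1) none else odds
  p.1.sum + odds.sum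

-- ===== PRECONDITION & SPEC =====
def Spec_max_even_sum (lst : List Int) (out : Int) : Prop := out = max_even_sum_alt lst
instance (lst : List Int) (out : Int) : Decidable (Spec_max_even_sum lst out) := by unfold Spec_max_even_sum; infer_instance

-- ===== CLAIM (what is proved, stated in full; the proofs are below) =====
def Claim_equal_max_even_sum : Prop := ∀ (lst : List Int), Dom_max_even_sum lst → Spec_max_even_sum lst (max_even_sum lst)

-- ===== LEMMAS AND PROOFS =====

-- A's fused loop splits into the plain sum fold and the odd-minimum fold.
theorem pvALoop_split (lst : List Int) : ∀ (s : Int) (mo : Option Int),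
    pvALoop lst (s, mo) =
      (lst.foldl (· + ·) s,
       lst.foldl (fun acc x => if PySem.Int.mod x 2 == 1 then
          (match acc with | none => some x | some m => some (min m x)) else acc) mo) := by
  induction lst with
  | nil => intro s mo; rfl
  | cons x xs ih =>
    intro s mo
    simp only [pvALoop, List.foldl_cons]
    by_cases h : (PySem.Int.mod x 2 == 1) = true
    · rw [if_pos h, ih, if_pos h]
    · rw [if_neg h, ih, if_neg h]

-- The odd-minimum fold computes min? of the filtered odd elements.
theorem pvOddFold_eq (lst : List Int) : ∀ (mo : Option Int),
    lst.foldl (fun acc x => if PySem.Int.mod x 2 == 1 then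
        (match acc with | none => some x | some m => some (min m x)) else acc) mo =
      (match mo with
       | none => PySem.List.min? (lst.filter (fun x => PySem.Int.mod x 2 == 1)) (fun y => y)
       | some m => some ((lst.filter (fun x => PySem.Int.mod x 2 == 1)).foldl min m)) := by
  induction lst with
  | nil => intro mo; cases mo <;> simp [PySem.List.min?]
  | cons x xs ih =>
    intro mo
    by_cases h : (PySem.Int.mod x 2 == 1) = true
    · cases mo with
      | none =>
        simp only [List.foldl_cons, List.filter_cons, h, if_true]
        rw [ih, PySem.List.min?_id_cons]
      | some m =>
        simp only [List.foldl_cons, List.filter_cons, h, if_true]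
        rw [ih]
    · cases mo <;>
        simp only [List.foldl_cons, List.filter_cons, h, if_false, Bool.false_eq_true] <;> rw [ih]

-- B's partition loop collects the even and odd elements (in order).
theorem pvPartLoop_eq (lst : List Int) : ∀ (ev od : List Int),
    pvPartLoop lst (ev, od) =
      (ev ++ lst.filter (fun x => !(PySem.Int.mod x 2 == 1)),
       od ++ lst.filter (fun x => PySem.Int.mod x 2 == 1)) := by
  induction lst with
  | nil => intro ev od; simp [pvPartLoop]
  | cons x xs ih =>
    intro ev od
    by_cases h : (PySem.Int.mod x 2 == 1) = true
    · simp only [pvPartLoop, List.filter_cons, h, Bool.not_true, if_true,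
        Bool.false_eq_true, if_false]
      rw [ih]; simp
    · have h' : (PySem.Int.mod x 2 == 1) = false := by simpa using h
      simp only [pvPartLoop, h', List.filter_cons, Bool.not_false, if_true,
        Bool.false_eq_true, if_false]
      rw [ih]; simp

-- sum of the list = sum of evens + sum of odds, and sum parity = odd-count parity.
theorem pvSum_split (lst : List Int) :
    lst.sum =
      (lst.filter (fun x => !(PySem.Int.mod x 2 == 1))).sum +
      (lst.filter (fun x => PySem.Int.mod x 2 == 1)).sum := by
  induction lst with
  | nil => simp
  | cons x xs ih =>
    by_cases h : (PySem.Int.mod x 2 == 1) = true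
    · simp only [List.sum_cons, List.filter_cons, h, Bool.not_true, Bool.false_eq_true,
        if_false, if_true, ih]
      ring
    · have h' : (PySem.Int.mod x 2 == 1) = false := by simpa using h
      simp only [List.sum_cons, List.filter_cons, h', Bool.not_false, Bool.false_eq_true,
        if_false, if_true, ih]
      ring

theorem pvSum_parity (lst : List Int) :
    (lst.sum) % 2 = ((lst.filter (fun x => PySem.Int.mod x 2 == 1)).length : Int) % 2 := by
  induction lst with
  | nil => simp
  | cons x xs ih =>
    have hm : PySem.Int.mod x 2 = x % 2 := PySem.Int.mod_eq_emod_of_pos (by norm_num)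
    have hx := Int.emod_two_eq x
    by_cases h : (PySem.Int.mod x 2 == 1) = true
    · have h1 : x % 2 = 1 := by rw [← hm]; exact beq_iff_eq.mp h
      simp only [List.sum_cons, List.filter_cons, h, if_true, List.length_cons]
      push_cast
      omega
    · have h0 : x % 2 = 0 := by
        rcases hx with h'' | h''
        · exact h''
        · exact absurd (by rw [hm, h'']; rfl) h
      have h' : (PySem.Int.mod x 2 == 1) = false := Bool.eq_false_iff.mpr h
      simp only [List.sum_cons, List.filter_cons, h', Bool.false_eq_true, if_false]
      omega

-- ===== VERDICT (by name: the statement is the Claim_ definition above) =====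
theorem max_even_sum_spec : Claim_equal_max_even_sum := by
  intro lst _
  unfold Spec_max_even_sum max_even_sum max_even_sum_alt
  rw [pvALoop_split, pvOddFold_eq, pvPartLoop_eq]
  simp only [List.nil_append]
  set odds := lst.filter (fun x => PySem.Int.mod x 2 == 1) with hodds
  set evens := lst.filter (fun x => !(PySem.Int.mod x 2 == 1)) with hevens
  have hfold : lst.foldl (· + ·) 0 = lst.sum := (List.sum_eq_foldl).symm
  have hsum : lst.foldl (· + ·) 0 = evens.sum + odds.sum := by rw [hfold]; exact pvSum_split lst
  have hpar : (lst.foldl (· + ·) 0) % 2 = ((odds.length : Int)) % 2 := by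
    rw [hfold]; exact pvSum_parity lst
  have hms : PySem.Int.mod (lst.foldl (· + ·) 0) 2 = (lst.foldl (· + ·) 0) % 2 :=
    PySem.Int.mod_eq_emod_of_pos (by norm_num)
  have hperm := PySem.List.sorted_perm odds (fun y => y) false
  have hlen : ((PySem.List.sorted odds (fun y => y) false).length : Int) = (odds.length : Int) := by
    rw [PySem.List.length_sorted]
  have hmsl : PySem.Int.mod ((PySem.List.sorted odds (fun y => y) false).length : Int) 2 =
      ((odds.length : Int)) % 2 := by
    rw [hlen]; exact PySem.Int.mod_eq_emod_of_pos (by norm_num)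
  by_cases hcase : ((odds.length : Int)) % 2 = 1
  · -- odd count: A subtracts the minimum odd, B drops the head of the sorted odds
    have hA : (PySem.Int.mod (lst.foldl (· + ·) 0) 2 == 1) = true := by
      rw [hms, hpar]; simpa using hcase
    have hB : (PySem.Int.mod ((PySem.List.sorted odds (fun y => y) false).length : Int) 2 == 1) = true := by
      rw [hmsl]; simpa using hcase
    rw [if_pos hA, if_pos hB]
    have hne : odds ≠ [] := by
      intro h0; rw [h0] at hcase; simp at hcase
    have hsne : PySem.List.sorted odds (fun y => y) false ≠ [] := by
      simpa [PySem.List.sorted_eq_nil_iff] using hne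
    obtain ⟨m, t, hmt⟩ := List.exists_cons_of_ne_nil hsne
    obtain ⟨mv, hmv⟩ : ∃ mv, PySem.List.min? odds (fun y => y) = some mv := by
      cases hm : PySem.List.min? odds (fun y => y) with
      | none => exact absurd ((PySem.List.min?_eq_none_iff _ _).mp hm) hne
      | some v => exact ⟨v, rfl⟩
    have hmmem : m ∈ odds := (PySem.List.mem_sorted _ _ _ _).mp (by rw [hmt]; exact List.mem_cons_self)
    have hmvmem : mv ∈ odds := PySem.List.min?_mem hmv
    have heq : mv = m := by
      have h1 : m ≤ mv := PySem.List.key_head_sorted_le odds (fun y => y) hmt mv hmvmem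
      have h2 : mv ≤ m := PySem.List.min?_isMin hmv m hmmem
      omega
    have hsorted_sum : (PySem.List.sorted odds (fun y => y) false).sum = odds.sum :=
      hperm.sum_eq
    rw [hmt, PySem.List.slice_from_one, hmv, hsum]
    rw [hmt] at hsorted_sum
    simp only [List.sum_cons] at hsorted_sum
    simp only [Option.getD_some, List.tail_cons, heq]
    omega
  · -- even count: both return the full sum
    have hA : (PySem.Int.mod (lst.foldl (· + ·) 0) 2 == 1) = false := by
      rw [hms, hpar]; simpa using hcase
    have hB : (PySem.Int.mod ((PySem.List.sorted odds (fun y => y) false).length : Int) 2 == 1) = false := by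
      rw [hmsl]; simpa using hcase
    rw [if_neg (by rw [hA]; exact Bool.false_ne_true), if_neg (by rw [hB]; exact Bool.false_ne_true), hsum, hperm.sum_eq]
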